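-- pv_equiv track=rewrite | github.com/oanatn/SAT_algorithms | dpll.py | unit_subsumption
-- ===== SOURCE A (Python) =====
-- def unit_subsumption(formula, assignment):
--     """Simplify the formula by removing clauses satisfied by the current assignment."""
--     if formula is None or [] in formula:
--         return None  # UNSAT due to empty clause
--
--     new_formula = []
--     for clause in formula:
--         if not any(literal in assignment for literal in clause):
--             new_formula.append(clause)
--     return new_formula
-- ===== SOURCE B (Python) =====
-- def unit_subsumption(formula, assignment):
--     """Simplify the formula by removing clauses satisfied by the current assignment."""
--     if formula is None:
--         return None
--
--     def go(clauses):
--         # single pass, recursive: None bubbles up from the first empty clause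
--         if not clauses:
--             return []
--         clause = clauses[0]
--         if clause == []:
--             return None
--         rest = go(clauses[1:])
--         if rest is None:
--             return None
--         if any(literal in assignment for literal in clause):
--             return rest
--         return [clause] + rest
--
--     return go(formula)
-- ===== Notes on version B (the rewrite author's own statement) =====
-- stated objective: alternative
-- what changed: Replaces A's two passes (a '[] in formula' membership scan followed by a filtering loop with an accumulator) by one recursive single pass over the clauses that short-circuits to None at an empty clause and builds the kept-clause list on the way back.
import Mathlib
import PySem

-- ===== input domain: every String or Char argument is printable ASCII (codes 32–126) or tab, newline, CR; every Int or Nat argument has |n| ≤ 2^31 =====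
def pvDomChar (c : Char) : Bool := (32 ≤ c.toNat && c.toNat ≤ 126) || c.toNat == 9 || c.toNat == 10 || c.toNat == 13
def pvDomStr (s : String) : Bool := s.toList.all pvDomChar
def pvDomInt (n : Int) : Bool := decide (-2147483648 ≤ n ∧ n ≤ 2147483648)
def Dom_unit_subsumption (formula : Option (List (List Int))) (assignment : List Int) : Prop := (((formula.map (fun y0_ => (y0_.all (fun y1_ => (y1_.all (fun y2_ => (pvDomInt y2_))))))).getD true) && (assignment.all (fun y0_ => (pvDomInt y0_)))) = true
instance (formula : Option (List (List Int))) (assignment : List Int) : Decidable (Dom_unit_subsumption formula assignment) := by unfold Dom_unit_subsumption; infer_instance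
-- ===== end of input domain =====

-- ===== PORT A =====
-- A: guard pass ('[] in formula'), then a filtering loop with an accumulator.
def unit_subsumption (formula : Option (List (List Int))) (assignment : List Int) : Option (List (List Int)) :=
  match formula with
  | none => none
  | some fl =>
    if ([] : List Int) ∈ fl then none
    else
      some (fl.foldl (fun new_formula clause =>
        if !(clause.any fun literal => assignment.contains literal)
        then new_formula ++ [clause] else new_formula) [])

-- ===== PORT B =====
-- B: one recursive pass; the first empty clause bubbles None up.
def pvGo (assignment : List Int) : List (List Int) → Option (List (List Int))
  | [] => some []
  | clause :: clauses =>
    if clause = ([] : List Int) then none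
    else
      match pvGo assignment clauses with
      | none => none
      | some rest =>
        if clause.any fun literal => assignment.contains literal
        then some rest else some ([clause] ++ rest)

def unit_subsumption_alt (formula : Option (List (List Int))) (assignment : List Int) : Option (List (List Int)) :=
  match formula with
  | none => none
  | some fl => pvGo assignment fl

-- ===== PRECONDITION & SPEC =====
def Spec_unit_subsumption (formula : Option (List (List Int))) (assignment : List Int) (out : Option (List (List Int))) : Prop := out = unit_subsumption_alt formula assignment
instance (formula : Option (List (List Int))) (assignment : List Int) (out : Option (List (List Int))) : Decidable (Spec_unit_subsumption formula assignment out) := by unfold Spec_unit_subsumption; infer_instance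

-- ===== CLAIM (what is proved, stated in full; the proofs are below) =====
def Claim_equal_unit_subsumption : Prop := ∀ (formula : Option (List (List Int))) (assignment : List Int), Dom_unit_subsumption formula assignment → Spec_unit_subsumption formula assignment (unit_subsumption formula assignment)

-- ===== LEMMAS AND PROOFS =====

theorem pvGo_eq (assignment : List Int) (fl : List (List Int)) :
    pvGo assignment fl =
      if ([] : List Int) ∈ fl then none
      else some (fl.filter (fun clause => !(clause.any fun l => assignment.contains l))) := by
  induction fl with
  | nil => simp [pvGo]
  | cons c cs ih =>
    simp only [pvGo, ih, List.mem_cons, List.filter_cons]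
    by_cases hc : c = ([] : List Int)
    · simp [hc]
    · by_cases hm : ([] : List Int) ∈ cs
      · simp [hc, hm]
      · by_cases ha : (c.any fun l => assignment.contains l) = true
        · simp at ha; simp [hc, hm, ha]
        · simp at ha
          have hne : ¬ ∃ x ∈ c, x ∈ assignment := by push_neg; exact ha
          simp [hc, hm, ha, hne]

theorem foldl_filter (p : List Int → Bool) (fl : List (List Int)) (acc : List (List Int)) :
    fl.foldl (fun nf c => if p c then nf ++ [c] else nf) acc = acc ++ fl.filter p := by
  induction fl generalizing acc with
  | nil => simp
  | cons c cs ih =>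
    simp only [List.foldl_cons, List.filter_cons]
    by_cases hp : p c = true <;> simp [hp, ih]

-- ===== VERDICT (by name: the statement is the Claim_ definition above) =====
theorem unit_subsumption_spec : Claim_equal_unit_subsumption := by
  intro formula assignment _
  unfold Spec_unit_subsumption unit_subsumption unit_subsumption_alt
  match formula with
  | none => rfl
  | some fl =>
    simp only [pvGo_eq]
    split_ifs with h
    · rfl
    · rw [foldl_filter, List.nil_append]
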